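-- pv_equiv track=rewrite | github.com/superhac/vpinfe | common/score_parser.py | high_nibble_bytes_to_int
-- ===== SOURCE A (Python) =====
-- def high_nibble_bytes_to_int(
--     byte_vals: list[int],
--     zero_byte: int | None = None,
--     zero_if_gte: int | None = None,
-- ) -> int:
--     """Convert bytes whose high nibbles represent digits into an integer."""
--     value = 0
--
--     for byte_val in reversed(byte_vals):
--         if zero_if_gte is not None and byte_val >= zero_if_gte:
--             digit = 0
--         elif zero_byte is not None and byte_val == zero_byte:
--             digit = 0
--         else:
--             digit = (byte_val >> 4) & 0x0F
--         if digit < 0 or digit > 9: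
--             raise ValueError(f"Invalid high-nibble digit byte: {byte_val}")
--         value = value * 10 + digit
--
--     return value
-- ===== SOURCE B (Python) =====
-- def _digit(byte_val, zero_byte, zero_if_gte):
--     if zero_if_gte is not None and byte_val >= zero_if_gte:
--         return 0
--     if zero_byte is not None and byte_val == zero_byte:
--         return 0
--     return (byte_val >> 4) & 0x0F
--
--
-- def high_nibble_bytes_to_int(
--     byte_vals: list[int],
--     zero_byte: int | None = None,
--     zero_if_gte: int | None = None,
-- ) -> int:
--     """Convert bytes whose high nibbles represent digits into an integer.
--
--     Forward pass with an explicit place value instead of reverse Horner.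
--     """
--     total = 0
--     place = 1
--     for byte_val in byte_vals:
--         digit = _digit(byte_val, zero_byte, zero_if_gte)
--         if digit > 9:
--             raise ValueError(f"Invalid high-nibble digit byte: {byte_val}")
--         total += digit * place
--         place *= 10
--     return total
-- ===== Notes on version B (the rewrite author's own statement) =====
-- stated objective: alternative
-- what changed: B scans byte_vals forward maintaining an explicit place-value accumulator (total += digit*place; place *= 10) with the digit extraction factored into a helper, instead of A's reverse iteration with Horner accumulation (value = value*10 + digit).
import Mathlib
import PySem

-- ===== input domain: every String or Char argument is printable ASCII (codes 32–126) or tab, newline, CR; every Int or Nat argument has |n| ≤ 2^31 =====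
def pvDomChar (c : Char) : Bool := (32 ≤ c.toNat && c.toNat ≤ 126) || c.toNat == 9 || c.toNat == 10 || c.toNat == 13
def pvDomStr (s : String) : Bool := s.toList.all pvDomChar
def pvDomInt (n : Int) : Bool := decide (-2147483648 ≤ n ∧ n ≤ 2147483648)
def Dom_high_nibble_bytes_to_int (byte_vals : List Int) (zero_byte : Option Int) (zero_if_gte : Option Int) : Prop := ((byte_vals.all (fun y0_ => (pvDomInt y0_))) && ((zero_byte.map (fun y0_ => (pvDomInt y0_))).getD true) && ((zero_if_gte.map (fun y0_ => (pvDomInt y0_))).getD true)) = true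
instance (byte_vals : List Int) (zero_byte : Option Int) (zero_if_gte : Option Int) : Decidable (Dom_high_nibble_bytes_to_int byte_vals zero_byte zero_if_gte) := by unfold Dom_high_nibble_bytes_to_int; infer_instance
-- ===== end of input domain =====

-- B replaces A's reverse-iteration Horner accumulation by a forward scan with an
-- explicit place-value accumulator (objective: alternative; same cost).


-- ===== PORT A =====
-- A's loop over reversed(byte_vals): Horner accumulation; the ValueError branch
-- returns a dummy 0 (Pre_ excludes exactly those inputs).
def hnLoopA : List Int → Option Int → Option Int → Int → Int
  | [], _, _, value => value
  | byte_val :: rest, zero_byte, zero_if_gte, value =>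
    let digit : Int :=
      if zero_if_gte.any (fun g => decide (byte_val ≥ g)) then 0
      else if zero_byte.any (fun z => decide (byte_val = z)) then 0
      else PySem.Int.band (byte_val >>> 4) 15
    if digit < 0 ∨ digit > 9 then 0  -- raise ValueError (excluded by Pre_)
    else hnLoopA rest zero_byte zero_if_gte (value * 10 + digit)

def high_nibble_bytes_to_int (byte_vals : List Int) (zero_byte : Option Int) (zero_if_gte : Option Int) : Int :=
  hnLoopA byte_vals.reverse zero_byte zero_if_gte 0

-- ===== PORT B =====
def digitB (byte_val : Int) (zero_byte : Option Int) (zero_if_gte : Option Int) : Int :=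
  if zero_if_gte.any (fun g => decide (byte_val ≥ g)) then 0
  else if zero_byte.any (fun z => decide (byte_val = z)) then 0
  else PySem.Int.band (byte_val >>> 4) 15

-- B's forward loop carrying (total, place).
def hnLoopB : List Int → Option Int → Option Int → Int → Int → Int
  | [], _, _, total, _ => total
  | byte_val :: rest, zero_byte, zero_if_gte, total, place =>
    let digit := digitB byte_val zero_byte zero_if_gte
    if digit > 9 then 0  -- raise ValueError (excluded by Pre_)
    else hnLoopB rest zero_byte zero_if_gte (total + digit * place) (place * 10)

def high_nibble_bytes_to_int_alt (byte_vals : List Int) (zero_byte : Option Int) (zero_if_gte : Option Int) : Int :=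
  hnLoopB byte_vals zero_byte zero_if_gte 0 1

-- ===== PRECONDITION & SPEC =====
-- Pre_ excludes exactly the inputs on which Python A raises ValueError: some byte whose
-- high nibble (when neither zero rule applies) is not a digit 0..9.
def Pre_high_nibble_bytes_to_int (byte_vals : List Int) (zero_byte : Option Int) (zero_if_gte : Option Int) : Prop :=
  ∀ b ∈ byte_vals,
    zero_if_gte.any (fun g => decide (b ≥ g)) = false →
    zero_byte.any (fun z => decide (b = z)) = false →
    PySem.Int.band (b >>> 4) 15 ≤ 9
instance (byte_vals : List Int) (zero_byte : Option Int) (zero_if_gte : Option Int) : Decidable (Pre_high_nibble_bytes_to_int byte_vals zero_byte zero_if_gte) := by unfold Pre_high_nibble_bytes_to_int; infer_instance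

def pvWitness_high_nibble_bytes_to_int : List Int × Option Int × Option Int := ([0x35, 0x10, 0x99], some 0x35, some 0x90)

def Spec_high_nibble_bytes_to_int (byte_vals : List Int) (zero_byte : Option Int) (zero_if_gte : Option Int) (out : Int) : Prop := out = high_nibble_bytes_to_int_alt byte_vals zero_byte zero_if_gte
instance (byte_vals : List Int) (zero_byte : Option Int) (zero_if_gte : Option Int) (out : Int) : Decidable (Spec_high_nibble_bytes_to_int byte_vals zero_byte zero_if_gte out) := by unfold Spec_high_nibble_bytes_to_int; infer_instance

-- ===== CLAIM (what is proved, stated in full; the proofs are below) =====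
def Claim_equal_high_nibble_bytes_to_int : Prop := ∀ (byte_vals : List Int) (zero_byte : Option Int) (zero_if_gte : Option Int), Dom_high_nibble_bytes_to_int byte_vals zero_byte zero_if_gte → Pre_high_nibble_bytes_to_int byte_vals zero_byte zero_if_gte → Spec_high_nibble_bytes_to_int byte_vals zero_byte zero_if_gte (high_nibble_bytes_to_int byte_vals zero_byte zero_if_gte)

-- ===== LEMMAS AND PROOFS =====

-- pure value: V l = Σ digit(l[i]) * 10^i
def hnV : List Int → Option Int → Option Int → Int
  | [], _, _ => 0
  | b :: rest, zb, zg => digitB b zb zg + 10 * hnV rest zb zg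

theorem digitB_nonneg (b : Int) (zb zg : Option Int) : 0 ≤ digitB b zb zg := by
  unfold digitB
  split_ifs <;> try rfl
  rw [PySem.Int.band_comm]
  exact PySem.Int.band_nonneg_of_nonneg_left _ (by norm_num)

theorem digitB_le9 (b : Int) (zb zg : Option Int)
    (h : zg.any (fun g => decide (b ≥ g)) = false → zb.any (fun z => decide (b = z)) = false → PySem.Int.band (b >>> 4) 15 ≤ 9) :
    digitB b zb zg ≤ 9 := by
  unfold digitB
  split_ifs with h1 h2
  · norm_num
  · norm_num
  · exact h (Bool.not_eq_true _ ▸ (eq_false_of_ne_true h1 : _)) (Bool.not_eq_true _ ▸ (eq_false_of_ne_true h2 : _))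

theorem hnLoopA_append (zb zg : Option Int) (b : Int) (xs : List Int) (acc : Int)
    (hxs : ∀ x ∈ xs, digitB x zb zg ≤ 9) (hb : digitB b zb zg ≤ 9) :
    hnLoopA (xs ++ [b]) zb zg acc = hnLoopA xs zb zg acc * 10 + digitB b zb zg := by
  induction xs generalizing acc with
  | nil =>
    have h0 := digitB_nonneg b zb zg
    have e : hnLoopA ([] ++ [b]) zb zg acc
        = if digitB b zb zg < 0 ∨ digitB b zb zg > 9 then 0
          else hnLoopA [] zb zg (acc * 10 + digitB b zb zg) := rfl
    rw [e, if_neg (by omega)]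
    rfl
  | cons x xs ih =>
    have hx : digitB x zb zg ≤ 9 := hxs x (by simp)
    have h0 := digitB_nonneg x zb zg
    have e1 : hnLoopA ((x :: xs) ++ [b]) zb zg acc
        = if digitB x zb zg < 0 ∨ digitB x zb zg > 9 then 0
          else hnLoopA (xs ++ [b]) zb zg (acc * 10 + digitB x zb zg) := rfl
    have e2 : hnLoopA (x :: xs) zb zg acc
        = if digitB x zb zg < 0 ∨ digitB x zb zg > 9 then 0
          else hnLoopA xs zb zg (acc * 10 + digitB x zb zg) := rfl
    rw [e1, e2, if_neg (by omega), if_neg (by omega)]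
    exact ih _ (fun y hy => hxs y (by simp [hy]))

theorem hnLoopA_eq_V (l : List Int) (zb zg : Option Int)
    (h : ∀ x ∈ l, digitB x zb zg ≤ 9) :
    hnLoopA l.reverse zb zg 0 = hnV l zb zg := by
  induction l with
  | nil => rfl
  | cons b rest ih =>
    rw [List.reverse_cons, hnLoopA_append zb zg b rest.reverse 0
        (fun x hx => h x (by simp at hx; simp [hx])) (h b (by simp))]
    rw [ih (fun x hx => h x (by simp [hx]))]
    simp only [hnV]; ring

theorem hnLoopB_eq_V (l : List Int) (zb zg : Option Int) (total place : Int)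
    (h : ∀ x ∈ l, digitB x zb zg ≤ 9) :
    hnLoopB l zb zg total place = total + place * hnV l zb zg := by
  induction l generalizing total place with
  | nil => simp only [hnLoopB, hnV]; ring
  | cons b rest ih =>
    have hb : digitB b zb zg ≤ 9 := h b (by simp)
    have e : hnLoopB (b :: rest) zb zg total place
        = if digitB b zb zg > 9 then 0
          else hnLoopB rest zb zg (total + digitB b zb zg * place) (place * 10) := rfl
    rw [e, if_neg (by omega)]
    rw [ih _ _ (fun x hx => h x (by simp [hx]))]
    simp only [hnV]; ring

-- ===== VERDICT (by name: the statement is the Claim_ definition above) =====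
theorem high_nibble_bytes_to_int_spec : Claim_equal_high_nibble_bytes_to_int := by
  intro byte_vals zero_byte zero_if_gte _ hpre
  unfold Spec_high_nibble_bytes_to_int high_nibble_bytes_to_int high_nibble_bytes_to_int_alt
  have hd : ∀ x ∈ byte_vals, digitB x zero_byte zero_if_gte ≤ 9 :=
    fun x hx => digitB_le9 x zero_byte zero_if_gte (hpre x hx)
  rw [hnLoopA_eq_V _ _ _ hd, hnLoopB_eq_V _ _ _ _ _ hd]
  ring
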